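-- pv_equiv track=rewrite | github.com/yg-moon/problem-solving | 2-websites/programmers/kakao/2022-blind/Q1-신고 결과 받기.py | solution
-- ===== SOURCE A (Python) =====
-- from collections import defaultdict
--
-- def solution(id_list, report, k):
--     info_dic = defaultdict(list)  # {유저: [자신이 신고한 유저들]}
--     cnt_dic = defaultdict(int)  # {유저: 신고당한 횟수}
--     answer = []
--
--     for r in set(report):  # 주의: 중복 신고는 1회로 처리
--         id1, id2 = r.split()
--         info_dic[id1].append(id2)
--         cnt_dic[id2] += 1
--
--     for id1 in id_list:
--         cnt = 0
--         for id2 in info_dic[id1]: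
--             if cnt_dic[id2] >= k:
--                 cnt += 1
--         answer.append(cnt)
--
--     return answer
-- ===== SOURCE B (Python) =====
-- def solution(id_list, report, k):
--     # One pass over the deduplicated reports per dict instead of per-user inner loops.
--     pairs = [r.split() for r in set(report)]
--     count = {}
--     for a, b in pairs:
--         count[b] = count.get(b, 0) + 1
--     result = {i: 0 for i in id_list}
--     for a, b in pairs:
--         if count.get(b, 0) >= k and a in result:
--             result[a] += 1
--     return [result[i] for i in id_list]
-- ===== Notes on version B (the rewrite author's own statement) =====
-- stated objective: alternative
-- what changed: B drops A's reporter-to-targets adjacency lists and per-user inner loops entirely: it builds a target-count dict in one pass over the deduplicated reports, then transposes the counting by a single pass over the same reports incrementing a result dict keyed on id_list.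
import Mathlib
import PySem

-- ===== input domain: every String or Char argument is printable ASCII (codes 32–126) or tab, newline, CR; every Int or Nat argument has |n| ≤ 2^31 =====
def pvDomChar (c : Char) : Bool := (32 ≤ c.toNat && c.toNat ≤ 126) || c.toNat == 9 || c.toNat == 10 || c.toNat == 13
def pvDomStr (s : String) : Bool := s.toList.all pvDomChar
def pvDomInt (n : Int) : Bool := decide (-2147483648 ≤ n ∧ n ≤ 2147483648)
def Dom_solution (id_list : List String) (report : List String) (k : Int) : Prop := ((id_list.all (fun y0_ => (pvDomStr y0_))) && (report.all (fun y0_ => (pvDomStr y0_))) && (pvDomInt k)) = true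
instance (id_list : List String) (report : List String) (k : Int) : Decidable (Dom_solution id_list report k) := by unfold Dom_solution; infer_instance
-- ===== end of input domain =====

-- B transposes the counting: one pass over the deduplicated reports into a target-count dict and a
-- result dict keyed on id_list, instead of A's per-user reporter→targets lists with inner loops (objective: alternative).


-- ===== PORT A =====
def solution (id_list : List String) (report : List String) (k : Int) : List Int :=
  let dicts := (PySem.Set.ofList report).foldl
    (fun (acc : PySem.Dict String (List String) × PySem.Dict String Int) r =>
      match PySem.Str.split₀ r with
      | [id1, id2] => (acc.1.modify id1 [] (· ++ [id2]), acc.2.modify id2 0 (· + 1))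
      | _ => acc)  -- 'id1, id2 = r.split()' raises ValueError here; excluded by Pre_
    (PySem.Dict.empty, PySem.Dict.empty)
  let info_dic := dicts.1
  let cnt_dic := dicts.2
  id_list.foldl (fun answer id1 =>
    answer ++ [(info_dic.getD id1 []).foldl
      (fun cnt id2 => if cnt_dic.getD id2 0 ≥ k then cnt + 1 else cnt) 0]) []

-- ===== PORT B =====
-- 'r.split()' unpacked into a pair; the ("","") fallback is where Python B raises ValueError (excluded by Pre_)
def pvPair (r : String) : String × String :=
  let w := PySem.Str.split₀ r
  (w.getD 0 "", w.getD 1 "")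

def solution_alt (id_list : List String) (report : List String) (k : Int) : List Int :=
  let pairs := (PySem.Set.ofList report).map pvPair
  let count := pairs.foldl
    (fun (d : PySem.Dict String Int) p => d.insert p.2 (d.getD p.2 0 + 1)) PySem.Dict.empty
  let result0 := id_list.foldl (fun (d : PySem.Dict String Int) i => d.insert i 0) PySem.Dict.empty
  let result := pairs.foldl
    (fun d p => if count.getD p.2 0 ≥ k ∧ d.contains p.1 = true
                then d.insert p.1 (d.getD p.1 0 + 1) else d) result0
  id_list.map (fun i => result.getD i 0)

-- ===== PRECONDITION & SPEC =====
-- Pre_ excludes reports that do not split into exactly two whitespace-separated tokens: there Python A raises ValueError.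
def Pre_solution (id_list : List String) (report : List String) (k : Int) : Prop :=
  ∀ r ∈ report, (PySem.Str.split₀ r).length = 2
instance (id_list : List String) (report : List String) (k : Int) : Decidable (Pre_solution id_list report k) := by unfold Pre_solution; infer_instance
def pvWitness_solution : List String × List String × Int :=
  (["muzi", "frodo", "apeach"], ["muzi frodo", "apeach frodo", "muzi frodo"], 2)
def Spec_solution (id_list : List String) (report : List String) (k : Int) (out : List Int) : Prop := out = solution_alt id_list report k
instance (id_list : List String) (report : List String) (k : Int) (out : List Int) : Decidable (Spec_solution id_list report k out) := by unfold Spec_solution; infer_instance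

-- ===== CLAIM (what is proved, stated in full; the proofs are below) =====
def Claim_equal_solution : Prop := ∀ (id_list : List String) (report : List String) (k : Int), Dom_solution id_list report k → Pre_solution id_list report k → Spec_solution id_list report k (solution id_list report k)

-- ===== LEMMAS AND PROOFS =====

-- A's combined loop, restricted to well-formed reports, is the two separate folds over the pair list.
theorem pvA_fold_eq (S : List String) (h : ∀ r ∈ S, (PySem.Str.split₀ r).length = 2) :
    S.foldl
      (fun (acc : PySem.Dict String (List String) × PySem.Dict String Int) r =>
        match PySem.Str.split₀ r with
        | [id1, id2] => (acc.1.modify id1 [] (· ++ [id2]), acc.2.modify id2 0 (· + 1))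
        | _ => acc)
      (PySem.Dict.empty, PySem.Dict.empty)
    = ((S.map pvPair).foldl (fun d p => d.modify p.1 [] (· ++ [p.2])) PySem.Dict.empty,
       (S.map pvPair).foldl (fun d p => d.modify p.2 0 (· + 1)) PySem.Dict.empty) := by
  suffices hgen : ∀ (S : List String), (∀ r ∈ S, (PySem.Str.split₀ r).length = 2) →
      ∀ (d1 : PySem.Dict String (List String)) (d2 : PySem.Dict String Int),
      S.foldl
        (fun (acc : PySem.Dict String (List String) × PySem.Dict String Int) r =>
          match PySem.Str.split₀ r with
          | [id1, id2] => (acc.1.modify id1 [] (· ++ [id2]), acc.2.modify id2 0 (· + 1))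
          | _ => acc) (d1, d2)
      = ((S.map pvPair).foldl (fun d p => d.modify p.1 [] (· ++ [p.2])) d1,
         (S.map pvPair).foldl (fun d p => d.modify p.2 0 (· + 1)) d2) by
    exact hgen S h _ _
  intro S h
  induction S with
  | nil => intro d1 d2; rfl
  | cons r t ih =>
      intro d1 d2
      have h2 := h r (by simp)
      have ht : ∀ x ∈ t, (PySem.Str.split₀ x).length = 2 := fun x hx => h x (by simp [hx])
      simp only [List.map_cons, List.foldl_cons]
      rw [← ih ht]
      congr 1
      unfold pvPair
      match hs : PySem.Str.split₀ r with
      | [a, b] => simp [hs]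
      | [] => simp [hs] at h2
      | [a] => simp [hs] at h2
      | a :: b :: c :: tl => simp [hs] at h2

-- every key of the zero-initialized dict maps to 0
theorem pvInit_getD (l : List String) (d : PySem.Dict String Int)
    (hd : ∀ x, d.getD x 0 = 0) (a : String) :
    (l.foldl (fun d i => d.insert i 0) d).getD a 0 = 0 := by
  induction l generalizing d with
  | nil => exact hd a
  | cons i t ih =>
      refine ih _ (fun x => ?_)
      rw [PySem.Dict.getD_insert]
      split <;> simp [hd]

theorem pvInit_contains (l : List String) (a : String) :
    (l.foldl (fun (d : PySem.Dict String Int) i => d.insert i 0) PySem.Dict.empty).contains a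
      = decide (a ∈ l) := by
  rw [PySem.Dict.contains_eq_decide_mem_keys, PySem.Dict.keys_foldl_insert]
  simp [PySem.Dict.keys_empty, PySem.Set.update_nil_left, PySem.Set.mem_ofList]

-- B's result loop adds, to each already-present key a, the number of pairs reporting as a with a flagged target.
theorem pvB_loop (q : String → Prop) [DecidablePred q] (L : List (String × String))
    (d : PySem.Dict String Int) (a : String) (ha : d.contains a = true) :
    (L.foldl (fun d p => if q p.2 ∧ d.contains p.1 = true
        then d.insert p.1 (d.getD p.1 0 + 1) else d) d).getD a 0
    = d.getD a 0 + (L.countP (fun p => decide (q p.2) && (p.1 == a)) : Int) := by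
  induction L generalizing d with
  | nil => simp
  | cons p t ih =>
      by_cases hq : q p.2
      · by_cases hc : d.contains p.1 = true
        · have hcont : (d.insert p.1 (d.getD p.1 0 + 1)).contains a = true := by
            rw [PySem.Dict.contains_insert]; simp [ha]
          simp only [List.foldl_cons]
          rw [if_pos (And.intro hq hc), ih _ hcont, PySem.Dict.getD_insert,
            List.countP_cons]
          by_cases hpa : a = p.1
          · simp only [hpa, BEq.rfl, decide_eq_true hq, Bool.and_true]
            push_cast; ring
          · have hne : (p.1 == a) = false := beq_eq_false_iff_ne.mpr (fun e => hpa e.symm)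
            simp [hpa, hq, hne]
        · simp only [List.foldl_cons, List.countP_cons]
          rw [if_neg (by simp [hc]), ih d ha]
          have hpa : (p.1 == a) = false := by
            refine beq_eq_false_iff_ne.mpr (fun e => hc ?_); rw [e]; exact ha
          simp [hpa, hq]
      · simp only [List.foldl_cons, List.countP_cons]
        rw [if_neg (by simp [hq]), ih d ha]
        simp [hq]

-- ===== VERDICT (by name: the statement is the Claim_ definition above) =====
theorem solution_spec : Claim_equal_solution := by
  intro id_list report k _ hpre
  unfold Spec_solution solution solution_alt
  have hS : ∀ r ∈ PySem.Set.ofList report, (PySem.Str.split₀ r).length = 2 := by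
    intro r hr
    exact hpre r (by simpa [PySem.Set.mem_ofList] using hr)
  rw [pvA_fold_eq _ hS]
  set L := (PySem.Set.ofList report).map pvPair with hL
  simp only
  rw [PySem.List.foldl_append_singleton_eq_map]
  refine List.map_congr_left (fun a haid => ?_)
  -- A's per-user value
  rw [PySem.Dict.getD_foldl_modify_append, PySem.Dict.getD_empty]
  rw [← List.foldl_map (f := fun p : String × String => p.2)
    (g := fun (d : PySem.Dict String Int) x => d.modify x 0 (· + 1))]
  simp only [List.nil_append]
  rw [PySem.List.foldl_ite_add_one]
  -- B's per-user value
  rw [pvB_loop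
    (fun b => (L.foldl (fun (d : PySem.Dict String Int) p => d.insert p.2 (d.getD p.2 0 + 1)) PySem.Dict.empty).getD b 0 ≥ k)
    L _ a (by rw [pvInit_contains]; simpa using haid)]
  rw [pvInit_getD _ _ (fun x => by rw [PySem.Dict.getD_empty])]
  -- both sides are counts over L; identify the predicates
  have hcnt : ∀ b, (L.foldl (fun (d : PySem.Dict String Int) p => d.insert p.2 (d.getD p.2 0 + 1)) PySem.Dict.empty).getD b 0
      = ((L.map (fun p => p.2)).foldl (fun (d : PySem.Dict String Int) x => d.modify x 0 (· + 1)) PySem.Dict.empty).getD b 0 := by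
    intro b
    rw [← List.foldl_map (f := fun p : String × String => p.2)
      (g := fun (d : PySem.Dict String Int) x => d.insert x (d.getD x 0 + 1))]
    rw [PySem.Dict.getD_foldl_insert_add_one, PySem.Dict.getD_foldl_modify_add_one]
  rw [List.countP_map, List.countP_filter]
  simp only [zero_add]
  congr 1
  refine List.countP_congr (fun p _ => ?_)
  simp [Function.comp, hcnt p.2, Bool.and_comm]
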